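-- pv_equiv track=rewrite | github.com/TheSunG4mer/BankoSimulations | ConstructBankoSheet.py | numberOfSheetsWithListType
-- ===== SOURCE A (Python) =====
-- def numberOfSheetsWithListType(top_row, middle_row, bottom_row, listType):
--     if not listType and top_row == 0 and middle_row == 0 and bottom_row == 0:
--         return 1
--     if top_row < 0 or middle_row < 0 or bottom_row < 0:
--         return 0
--     if not listType:
--         return 0
--     total = 0
--     if listType[0] == 1:
--         total += numberOfSheetsWithListType(top_row - 1, middle_row, bottom_row, listType[1:])
--         total += numberOfSheetsWithListType(top_row, middle_row - 1, bottom_row, listType[1:])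
--         total += numberOfSheetsWithListType(top_row, middle_row, bottom_row - 1, listType[1:])
--         return total
--     if listType[0] == 2:
--         total += numberOfSheetsWithListType(top_row - 1, middle_row - 1, bottom_row, listType[1:])
--         total += numberOfSheetsWithListType(top_row - 1, middle_row, bottom_row - 1, listType[1:])
--         total += numberOfSheetsWithListType(top_row, middle_row - 1, bottom_row - 1, listType[1:])
--         return total
--     if listType[0] == 3:
--         return numberOfSheetsWithListType(top_row - 1, middle_row - 1, bottom_row - 1, listType[1:])
-- ===== SOURCE B (Python) =====
-- def _deltasFor(t):
--     # which (top, middle, bottom) decrements a column of this type allows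
--     if t == 1:
--         return [(1, 0, 0), (0, 1, 0), (0, 0, 1)]
--     if t == 2:
--         return [(1, 1, 0), (1, 0, 1), (0, 1, 1)]
--     if t == 3:
--         return [(1, 1, 1)]
--     return []
--
-- def numberOfSheetsWithListType(top_row, middle_row, bottom_row, listType):
--     # forward DP over the columns: dict mapping remaining (top, middle, bottom)
--     # row counts to the number of ways to reach that state
--     states = {(top_row, middle_row, bottom_row): 1}
--     for t in listType:
--         deltas = _deltasFor(t)
--         new = {}
--         for (a, b, c), w in states.items():
--             for (da, db, dc) in deltas:
--                 na, nb, nc = a - da, b - db, c - dc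
--                 if na >= 0 and nb >= 0 and nc >= 0:
--                     new[(na, nb, nc)] = new.get((na, nb, nc), 0) + w
--         states = new
--     return states.get((0, 0, 0), 0)
-- ===== Notes on version B (the rewrite author's own statement) =====
-- stated objective: alternative
-- what changed: Replaced A's three-way branching recursion over the column list by a single forward pass that keeps a dict from remaining (top,middle,bottom) row counts to the number of ways to reach them, so shared states are merged instead of re-explored (exponentially faster in principle, but a timing run's large inputs lie outside Pre_, so no speed is claimed).
-- outside the precondition, e.g. on numberOfSheetsWithListType(1, 1, 1, [0]): A returns None, B returns 0; on numberOfSheetsWithListType(0, 0, 0, [1, 5]): A returns 0, B returns 0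
import Mathlib
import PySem

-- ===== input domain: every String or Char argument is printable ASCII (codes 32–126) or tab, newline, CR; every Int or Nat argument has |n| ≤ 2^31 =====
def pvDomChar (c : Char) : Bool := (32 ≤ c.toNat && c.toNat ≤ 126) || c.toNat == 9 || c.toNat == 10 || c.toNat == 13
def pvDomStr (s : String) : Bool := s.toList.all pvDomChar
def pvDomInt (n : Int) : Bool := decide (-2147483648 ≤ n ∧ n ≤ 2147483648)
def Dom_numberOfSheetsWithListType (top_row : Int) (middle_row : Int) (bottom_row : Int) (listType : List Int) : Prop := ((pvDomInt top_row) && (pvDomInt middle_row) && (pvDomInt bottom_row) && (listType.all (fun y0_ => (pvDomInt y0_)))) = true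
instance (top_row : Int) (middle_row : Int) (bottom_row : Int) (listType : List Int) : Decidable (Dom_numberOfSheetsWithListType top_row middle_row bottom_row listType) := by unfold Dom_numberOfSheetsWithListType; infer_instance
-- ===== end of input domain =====

-- B replaces A's 3-way branching recursion by a forward dynamic programme over
-- the columns that keeps a dict of reachable remaining row counts with
-- multiplicities, merging shared states instead of re-exploring them
-- (objective: alternative).

-- ===== PORT A =====
-- Literal port of A's recursion; in the final fall-through (first column type
-- not 1/2/3 with nonnegative row counts) Python A returns None and the caller
-- raises TypeError — those inputs are outside Pre_; the port returns 0 there.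
def numberOfSheetsWithListType (top_row : Int) (middle_row : Int) (bottom_row : Int) (listType : List Int) : Int :=
  if listType = [] ∧ top_row = 0 ∧ middle_row = 0 ∧ bottom_row = 0 then 1
  else if top_row < 0 ∨ middle_row < 0 ∨ bottom_row < 0 then 0
  else
    match listType with
    | [] => 0
    | x :: rest =>
      if x = 1 then
        numberOfSheetsWithListType (top_row - 1) middle_row bottom_row rest
          + numberOfSheetsWithListType top_row (middle_row - 1) bottom_row rest
          + numberOfSheetsWithListType top_row middle_row (bottom_row - 1) rest
      else if x = 2 then
        numberOfSheetsWithListType (top_row - 1) (middle_row - 1) bottom_row rest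
          + numberOfSheetsWithListType (top_row - 1) middle_row (bottom_row - 1) rest
          + numberOfSheetsWithListType top_row (middle_row - 1) (bottom_row - 1) rest
      else if x = 3 then
        numberOfSheetsWithListType (top_row - 1) (middle_row - 1) (bottom_row - 1) rest
      else 0
  termination_by listType.length
  decreasing_by all_goals simp [List.length_cons]

-- ===== PORT B =====
-- port of Source B's _deltasFor
def pvDeltasFor (t : Int) : List (Int × Int × Int) :=
  if t = 1 then [(1, 0, 0), (0, 1, 0), (0, 0, 1)]
  else if t = 2 then [(1, 1, 0), (1, 0, 1), (0, 1, 1)]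
  else if t = 3 then [(1, 1, 1)]
  else []

-- one step of Source B's loop body: rebuild the state dict after one column
def pvStep (deltas : List (Int × Int × Int)) (states : PySem.Dict (Int × Int × Int) Int) :
    PySem.Dict (Int × Int × Int) Int :=
  states.items.foldl (fun new p =>
    deltas.foldl (fun new d =>
      let na := p.1.1 - d.1
      let nb := p.1.2.1 - d.2.1
      let nc := p.1.2.2 - d.2.2
      if 0 ≤ na ∧ 0 ≤ nb ∧ 0 ≤ nc then
        new.insert (na, nb, nc) (new.getD (na, nb, nc) 0 + p.2)
      else new) new) PySem.Dict.empty

def numberOfSheetsWithListType_alt (top_row : Int) (middle_row : Int) (bottom_row : Int) (listType : List Int) : Int :=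
  let init : PySem.Dict (Int × Int × Int) Int :=
    PySem.Dict.empty.insert (top_row, middle_row, bottom_row) 1
  let final := listType.foldl (fun states t => pvStep (pvDeltasFor t) states) init
  final.getD (0, 0, 0) 0


-- ===== PRECONDITION & SPEC =====
-- Pre_ excludes lists containing a column type outside {1,2,3} when all three
-- row counts are nonnegative: on those inputs Python A can reach the
-- fall-through branch, which yields None -- a TypeError in a recursive caller,
-- or a plain None return (no int) at top level; on a few of them A still
-- returns 0 because every recursion path exhausts a row count before reaching
-- the bad element (B also returns 0 there).
def Pre_numberOfSheetsWithListType (top_row : Int) (middle_row : Int) (bottom_row : Int) (listType : List Int) : Prop :=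
  listType.all (fun x => x == 1 || x == 2 || x == 3) = true
    ∨ top_row < 0 ∨ middle_row < 0 ∨ bottom_row < 0
instance (top_row : Int) (middle_row : Int) (bottom_row : Int) (listType : List Int) : Decidable (Pre_numberOfSheetsWithListType top_row middle_row bottom_row listType) := by unfold Pre_numberOfSheetsWithListType; infer_instance

def pvWitness_numberOfSheetsWithListType : Int × Int × Int × List Int := (1, 2, 2, [1, 2, 2])

def Spec_numberOfSheetsWithListType (top_row : Int) (middle_row : Int) (bottom_row : Int) (listType : List Int) (out : Int) : Prop := out = numberOfSheetsWithListType_alt top_row middle_row bottom_row listType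
instance (top_row : Int) (middle_row : Int) (bottom_row : Int) (listType : List Int) (out : Int) : Decidable (Spec_numberOfSheetsWithListType top_row middle_row bottom_row listType out) := by unfold Spec_numberOfSheetsWithListType; infer_instance

-- ===== CLAIM (what is proved, stated in full; the proofs are below) =====
def Claim_equal_numberOfSheetsWithListType : Prop := ∀ (top_row : Int) (middle_row : Int) (bottom_row : Int) (listType : List Int), Dom_numberOfSheetsWithListType top_row middle_row bottom_row listType → Pre_numberOfSheetsWithListType top_row middle_row bottom_row listType → Spec_numberOfSheetsWithListType top_row middle_row bottom_row listType (numberOfSheetsWithListType top_row middle_row bottom_row listType)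

-- ===== LEMMAS AND PROOFS =====
-- The two ports in fact agree on ALL inputs (the port of A returns 0 in the
-- fall-through branch where Python A raises), so the lemmas below prove
-- unconditional agreement; the Pre_ hypothesis only delimits where the port
-- of A is faithful to the Python.

theorem A_neg (t m b : Int) (l : List Int) (h : t < 0 ∨ m < 0 ∨ b < 0) :
    numberOfSheetsWithListType t m b l = 0 := by
  cases l <;> (rw [numberOfSheetsWithListType]; simp_all; try omega)

theorem A_guard (t m b : Int) (rest : List Int) :
    (if 0 ≤ t ∧ 0 ≤ m ∧ 0 ≤ b then numberOfSheetsWithListType t m b rest else 0)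
      = numberOfSheetsWithListType t m b rest := by
  split_ifs with h
  · rfl
  · rw [A_neg]; omega

theorem deltas1 : pvDeltasFor 1 = [(1, 0, 0), (0, 1, 0), (0, 0, 1)] := by norm_num [pvDeltasFor]
theorem deltas2 : pvDeltasFor 2 = [(1, 1, 0), (1, 0, 1), (0, 1, 1)] := by norm_num [pvDeltasFor]
theorem deltas3 : pvDeltasFor 3 = [(1, 1, 1)] := by norm_num [pvDeltasFor]
theorem deltas_bad (x : Int) (h1 : x ≠ 1) (h2 : x ≠ 2) (h3 : x ≠ 3) : pvDeltasFor x = [] := by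
  simp [pvDeltasFor, h1, h2, h3]

theorem A_cons (t m b x : Int) (rest : List Int) :
    numberOfSheetsWithListType t m b (x :: rest) =
      ((pvDeltasFor x).map (fun d =>
        if 0 ≤ t - d.1 ∧ 0 ≤ m - d.2.1 ∧ 0 ≤ b - d.2.2 then
          numberOfSheetsWithListType (t - d.1) (m - d.2.1) (b - d.2.2) rest
        else 0)).sum := by
  have unf : numberOfSheetsWithListType t m b (x :: rest) =
      (if t < 0 ∨ m < 0 ∨ b < 0 then 0
       else if x = 1 then
        numberOfSheetsWithListType (t - 1) m b rest
          + numberOfSheetsWithListType t (m - 1) b rest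
          + numberOfSheetsWithListType t m (b - 1) rest
      else if x = 2 then
        numberOfSheetsWithListType (t - 1) (m - 1) b rest
          + numberOfSheetsWithListType (t - 1) m (b - 1) rest
          + numberOfSheetsWithListType t (m - 1) (b - 1) rest
      else if x = 3 then
        numberOfSheetsWithListType (t - 1) (m - 1) (b - 1) rest
      else 0) := by
    rw [numberOfSheetsWithListType]; simp
  rw [unf]
  by_cases hneg : t < 0 ∨ m < 0 ∨ b < 0
  · rw [if_pos hneg]
    by_cases h1 : x = 1
    · subst h1
      simp only [deltas1, List.map_cons, List.map_nil, List.sum_cons, List.sum_nil, A_guard,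
        sub_zero]
      rw [A_neg (t-1) m b rest (by omega), A_neg t (m-1) b rest (by omega),
        A_neg t m (b-1) rest (by omega)]
      simp
    · by_cases h2 : x = 2
      · subst h2
        simp only [deltas2, List.map_cons, List.map_nil, List.sum_cons, List.sum_nil, A_guard,
          sub_zero]
        rw [A_neg (t-1) (m-1) b rest (by omega), A_neg (t-1) m (b-1) rest (by omega),
          A_neg t (m-1) (b-1) rest (by omega)]
        simp
      · by_cases h3 : x = 3
        · subst h3
          simp only [deltas3, List.map_cons, List.map_nil, List.sum_cons, List.sum_nil, A_guard]
          rw [A_neg (t-1) (m-1) (b-1) rest (by omega)]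
          simp
        · simp [deltas_bad x h1 h2 h3]
  · rw [if_neg hneg]
    by_cases h1 : x = 1
    · subst h1
      rw [if_pos rfl]
      simp only [deltas1, List.map_cons, List.map_nil, List.sum_cons, List.sum_nil, A_guard,
        sub_zero]
      ring
    · by_cases h2 : x = 2
      · subst h2
        rw [if_neg (by norm_num), if_pos rfl]
        simp only [deltas2, List.map_cons, List.map_nil, List.sum_cons, List.sum_nil, A_guard,
          sub_zero]
        ring
      · by_cases h3 : x = 3
        · subst h3
          rw [if_neg (by norm_num), if_neg (by norm_num), if_pos rfl]
          simp only [deltas3, List.map_cons, List.map_nil, List.sum_cons, List.sum_nil, A_guard]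
          ring
        · rw [if_neg h1, if_neg h2, if_neg h3]
          simp [deltas_bad x h1 h2 h3]

-- weighted sum of g over an items list
def wsum (l : List ((Int × Int × Int) × Int)) (g : Int × Int × Int → Int) : Int :=
  (l.map (fun p => p.2 * g p.1)).sum

theorem wsum_replace (l : List ((Int × Int × Int) × Int)) (k : Int × Int × Int) (v nv : Int)
    (g : Int × Int × Int → Int) (hn : (l.map Prod.fst).Nodup) (hmem : (k, v) ∈ l) :
    wsum (l.map (fun p => if p.1 == k then (k, nv) else p)) g
      = wsum l g - v * g k + nv * g k := by
  induction l with
  | nil => simp at hmem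
  | cons p tl ih =>
    simp only [List.map_cons, List.nodup_cons] at hn
    rcases List.mem_cons.mp hmem with h | h
    · have hp : p = (k, v) := h.symm
      subst hp
      have htl : tl.map (fun p => if p.1 == k then (k, nv) else p) = tl := by
        apply List.map_congr_left ?_ |>.trans (List.map_id tl)
        intro q hq
        have : q.1 ≠ k := fun he => hn.1 (he ▸ List.mem_map.mpr ⟨q, hq, rfl⟩)
        simp [this]
      simp only [List.map_cons, beq_self_eq_true, if_true, htl]
      simp [wsum]
      ring
    · have hk : k ∈ tl.map Prod.fst := List.mem_map.mpr ⟨(k, v), h, rfl⟩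
      have hpk : p.1 ≠ k := fun he => hn.1 (he ▸ hk)
      have := ih hn.2 h
      simp only [wsum, List.map_cons, List.sum_cons, beq_iff_eq] at this ⊢
      rw [if_neg hpk, this]
      ring

theorem wsum_addTo (d : PySem.Dict (Int × Int × Int) Int) (hn : d.keys.Nodup)
    (k : Int × Int × Int) (w : Int) (g : Int × Int × Int → Int) :
    wsum (d.insert k (d.getD k 0 + w)).items g = wsum d.items g + w * g k := by
  by_cases hc : d.contains k = true
  · have hmem : (k, d.getD k 0) ∈ d.items := by
      rw [PySem.Dict.contains_eq_isSome_get?] at hc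
      obtain ⟨v, hv⟩ := Option.isSome_iff_exists.mp hc
      have := PySem.Dict.mem_items_of_get?_eq_some d hv
      rwa [PySem.Dict.getD_of_get?_eq_some d 0 hv]
    rw [PySem.Dict.items_insert_of_contains d _ hc]
    have hn' : (d.items.map Prod.fst).Nodup := by
      simpa only [PySem.Dict.keys] using hn
    rw [wsum_replace d.items k (d.getD k 0) (d.getD k 0 + w) g hn' hmem]
    ring
  · have hc' : d.contains k = false := by simpa using hc
    rw [PySem.Dict.items_insert_of_not_contains d _ hc', PySem.Dict.getD_of_not_contains d 0 hc']
    simp [wsum]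

-- the body of Source B's inner loop over deltas, for one state entry p
def innerF (p : (Int × Int × Int) × Int) (new : PySem.Dict (Int × Int × Int) Int)
    (d : Int × Int × Int) : PySem.Dict (Int × Int × Int) Int :=
  if 0 ≤ p.1.1 - d.1 ∧ 0 ≤ p.1.2.1 - d.2.1 ∧ 0 ≤ p.1.2.2 - d.2.2 then
    new.insert (p.1.1 - d.1, p.1.2.1 - d.2.1, p.1.2.2 - d.2.2)
      (new.getD (p.1.1 - d.1, p.1.2.1 - d.2.1, p.1.2.2 - d.2.2) 0 + p.2)
  else new

theorem pvStep_eq (deltas : List (Int × Int × Int)) (states : PySem.Dict (Int × Int × Int) Int) :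
    pvStep deltas states = states.items.foldl (fun new p => deltas.foldl (innerF p) new)
      PySem.Dict.empty := rfl

theorem pvInnerNodup (deltas : List (Int × Int × Int)) (p : (Int × Int × Int) × Int) :
    ∀ d : PySem.Dict (Int × Int × Int) Int, d.keys.Nodup → (deltas.foldl (innerF p) d).keys.Nodup := by
  induction deltas with
  | nil => intro d hn; exact hn
  | cons δ tl ih =>
    intro d hn
    rw [List.foldl_cons]
    apply ih
    unfold innerF
    split_ifs with h
    · exact PySem.Dict.nodup_keys_insert d _ _ hn
    · exact hn

theorem pvInnerSum (deltas : List (Int × Int × Int)) (p : (Int × Int × Int) × Int)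
    (g : Int × Int × Int → Int) :
    ∀ d : PySem.Dict (Int × Int × Int) Int, d.keys.Nodup →
      wsum (deltas.foldl (innerF p) d).items g
        = wsum d.items g + p.2 * (deltas.map (fun δ =>
            if 0 ≤ p.1.1 - δ.1 ∧ 0 ≤ p.1.2.1 - δ.2.1 ∧ 0 ≤ p.1.2.2 - δ.2.2 then
              g (p.1.1 - δ.1, p.1.2.1 - δ.2.1, p.1.2.2 - δ.2.2)
            else 0)).sum := by
  induction deltas with
  | nil => intro d hn; simp
  | cons δ tl ih =>
    intro d hn
    rw [List.foldl_cons, List.map_cons, List.sum_cons]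
    by_cases h : 0 ≤ p.1.1 - δ.1 ∧ 0 ≤ p.1.2.1 - δ.2.1 ∧ 0 ≤ p.1.2.2 - δ.2.2
    · have hstep : innerF p d δ
          = d.insert (p.1.1 - δ.1, p.1.2.1 - δ.2.1, p.1.2.2 - δ.2.2)
              (d.getD (p.1.1 - δ.1, p.1.2.1 - δ.2.1, p.1.2.2 - δ.2.2) 0 + p.2) := by
        unfold innerF
        rw [if_pos h]
      rw [hstep, ih _ (PySem.Dict.nodup_keys_insert d _ _ hn),
        wsum_addTo d hn _ p.2 g, if_pos h]
      ring
    · have hstep : innerF p d δ = d := by unfold innerF; rw [if_neg h]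
      rw [hstep, ih d hn, if_neg h]
      ring

theorem pvOuterNodup (deltas : List (Int × Int × Int)) (L : List ((Int × Int × Int) × Int)) :
    ∀ acc : PySem.Dict (Int × Int × Int) Int, acc.keys.Nodup →
      (L.foldl (fun new p => deltas.foldl (innerF p) new) acc).keys.Nodup := by
  induction L with
  | nil => intro acc hn; exact hn
  | cons p tl ih =>
    intro acc hn
    rw [List.foldl_cons]
    exact ih _ (pvInnerNodup deltas p acc hn)

theorem pvOuterSum (deltas : List (Int × Int × Int)) (g : Int × Int × Int → Int)
    (L : List ((Int × Int × Int) × Int)) :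
    ∀ acc : PySem.Dict (Int × Int × Int) Int, acc.keys.Nodup →
      wsum (L.foldl (fun new p => deltas.foldl (innerF p) new) acc).items g
        = wsum acc.items g + wsum L (fun k => (deltas.map (fun δ =>
            if 0 ≤ k.1 - δ.1 ∧ 0 ≤ k.2.1 - δ.2.1 ∧ 0 ≤ k.2.2 - δ.2.2 then
              g (k.1 - δ.1, k.2.1 - δ.2.1, k.2.2 - δ.2.2)
            else 0)).sum) := by
  induction L with
  | nil => intro acc hn; simp [wsum]
  | cons p tl ih =>
    intro acc hn
    rw [List.foldl_cons, ih _ (pvInnerNodup deltas p acc hn), pvInnerSum deltas p g acc hn]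
    simp only [wsum, List.map_cons, List.sum_cons]
    ring

theorem A_nil (t m b : Int) :
    numberOfSheetsWithListType t m b []
      = (if t = 0 ∧ m = 0 ∧ b = 0 then 1 else 0) := by
  rw [numberOfSheetsWithListType]
  simp

theorem wsum_cons (p : (Int × Int × Int) × Int) (tl : List ((Int × Int × Int) × Int))
    (g : Int × Int × Int → Int) : wsum (p :: tl) g = p.2 * g p.1 + wsum tl g := by
  simp [wsum]

theorem wsum_ind_zero (l : List ((Int × Int × Int) × Int))
    (h : ((0 : Int), (0 : Int), (0 : Int)) ∉ l.map Prod.fst) :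
    wsum l (fun k => if k.1 = 0 ∧ k.2.1 = 0 ∧ k.2.2 = 0 then 1 else 0) = 0 := by
  induction l with
  | nil => rfl
  | cons p tl ih =>
    simp only [List.map_cons, List.mem_cons, not_or] at h
    have hp : ¬(p.1.1 = 0 ∧ p.1.2.1 = 0 ∧ p.1.2.2 = 0) := by
      intro hc
      exact h.1 (by apply Prod.ext <;> simp_all [Prod.ext_iff])
    simp only [wsum, List.map_cons, List.sum_cons] at *
    rw [if_neg hp, ih h.2]
    ring

theorem getD_eq_wsum_ind (l : List ((Int × Int × Int) × Int))
    (hn : (l.map Prod.fst).Nodup) :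
    (PySem.Dict.mk l).getD ((0 : Int), (0 : Int), (0 : Int)) 0
      = wsum l (fun k => if k.1 = 0 ∧ k.2.1 = 0 ∧ k.2.2 = 0 then 1 else 0) := by
  induction l with
  | nil => rfl
  | cons p tl ih =>
    obtain ⟨k, v⟩ := p
    simp only [List.map_cons, List.nodup_cons] at hn
    rw [PySem.Dict.getD_eq_get?_getD, PySem.Dict.get?_mk_cons]
    by_cases hk : k = ((0 : Int), (0 : Int), (0 : Int))
    · subst hk
      rw [if_pos (by simp), Option.getD_some, wsum_cons, wsum_ind_zero tl hn.1]
      norm_num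
    · have hb : (k == ((0 : Int), (0 : Int), (0 : Int))) = false := by
        simpa using hk
      rw [hb]
      simp only [Bool.false_eq_true, if_false]
      rw [← PySem.Dict.getD_eq_get?_getD, ih hn.2, wsum_cons]
      have hki : ¬(k.1 = 0 ∧ k.2.1 = 0 ∧ k.2.2 = 0) := by
        intro hc
        exact hk (by apply Prod.ext <;> simp_all [Prod.ext_iff])
      rw [if_neg hki]
      ring

theorem pvRun (l : List Int) :
    ∀ d : PySem.Dict (Int × Int × Int) Int, d.keys.Nodup →
      (l.foldl (fun states t => pvStep (pvDeltasFor t) states) d).getD ((0:Int), (0:Int), (0:Int)) 0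
        = wsum d.items (fun k => numberOfSheetsWithListType k.1 k.2.1 k.2.2 l) := by
  induction l with
  | nil =>
    intro d hn
    obtain ⟨items⟩ := d
    rw [List.foldl_nil, getD_eq_wsum_ind items (by simpa [PySem.Dict.keys_mk] using hn)]
    simp only [wsum]
    congr 1
    apply List.map_congr_left
    intro p _
    rw [A_nil]
  | cons x tl ih =>
    intro d hn
    rw [List.foldl_cons, ih _ (by rw [pvStep_eq]; exact pvOuterNodup _ _ _ PySem.Dict.nodup_keys_empty),
      pvStep_eq, pvOuterSum _ _ _ PySem.Dict.empty PySem.Dict.nodup_keys_empty]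
    have hempty : wsum PySem.Dict.empty.items (fun k => numberOfSheetsWithListType k.1 k.2.1 k.2.2 tl) = 0 := rfl
    rw [hempty, zero_add]
    simp only [wsum]
    congr 1
    apply List.map_congr_left
    intro p _
    rw [A_cons p.1.1 p.1.2.1 p.1.2.2 x tl]

theorem A_eq_alt (t m b : Int) (l : List Int) :
    numberOfSheetsWithListType t m b l = numberOfSheetsWithListType_alt t m b l := by
  unfold numberOfSheetsWithListType_alt
  have hinit : (PySem.Dict.empty.insert (t, m, b) (1 : Int)).items = [((t, m, b), 1)] := by
    rw [PySem.Dict.items_insert_of_not_contains _ _ (by simp [PySem.Dict.contains_empty])]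
    rfl
  rw [pvRun l _ (PySem.Dict.nodup_keys_insert _ _ _ PySem.Dict.nodup_keys_empty), hinit]
  simp [wsum]

-- ===== VERDICT (by name: the statement is the Claim_ definition above) =====
theorem numberOfSheetsWithListType_spec : Claim_equal_numberOfSheetsWithListType := by
  intro top_row middle_row bottom_row listType _ _
  unfold Spec_numberOfSheetsWithListType
  exact A_eq_alt top_row middle_row bottom_row listType
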